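-- pv_equiv track=rewrite | github.com/mcappadonna/aoc2022 | day03/day3-2.py | find_match
-- ===== SOURCE A (Python) =====
-- def update_items(elf: str, items: {}):
--     for item in elf:
--         if item not in items:
--             items.update({item: 1})
--         else:
--             items[item] += 1
--     return items
--
-- def find_match(elves: []):
--     items = {}
--     match = ""
--     for elf in elves:
--         items = update_items(elf, items)
--     for key in items.keys():
--         if items[key] == 3:
--             match = key
--             break
--     return match
-- ===== SOURCE B (Python) =====
-- def find_match(elves: []):
--     def go(pool):
--         if not pool:
--             return ""
--         first = pool[0]
--         rest = [x for x in pool if x != first]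
--         if len(pool) - len(rest) == 3:
--             return first
--         return go(rest)
--     return go(list("".join(elves)))
-- ===== Notes on version B (the rewrite author's own statement) =====
-- stated objective: alternative
-- what changed: Replaces A's single-pass occurrence dict plus insertion-order key scan by recursive successive elimination with no counting structure at all: join the strings, take the first character of the remaining pool, read its multiplicity off as the length drop when filtering it out of the pool, return it if that drop is 3, otherwise recurse on the filtered residue.
import Mathlib
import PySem

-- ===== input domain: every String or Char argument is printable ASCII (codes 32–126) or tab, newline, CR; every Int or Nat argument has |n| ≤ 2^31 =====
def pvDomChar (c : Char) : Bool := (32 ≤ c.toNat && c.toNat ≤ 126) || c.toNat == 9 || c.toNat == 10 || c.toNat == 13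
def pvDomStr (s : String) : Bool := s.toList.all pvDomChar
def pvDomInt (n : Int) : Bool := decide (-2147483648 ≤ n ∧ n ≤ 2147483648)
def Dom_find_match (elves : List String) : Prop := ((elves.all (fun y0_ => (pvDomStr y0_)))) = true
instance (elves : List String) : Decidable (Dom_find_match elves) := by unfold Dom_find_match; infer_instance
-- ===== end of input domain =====

-- B replaces A's occurrence dict + insertion-order key scan by recursive successive
-- elimination: take the first character of the remaining pool, read off its multiplicity
-- as the length drop when filtering it out, return it if it is 3, else recurse on the residue.

-- ===== PORT A =====
-- update_items: for item in elf: if item not in items: items[item]=1 else: items[item]+=1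
def update_items (elf : String) (items : PySem.Dict Char Int) : PySem.Dict Char Int :=
  elf.toList.foldl
    (fun d c => if !(d.contains c) then d.insert c 1 else d.insert c (d.getD c 0 + 1)) items

-- for key in items.keys(): if items[key] == 3: match = key; break
def scanKeys (items : PySem.Dict Char Int) : List Char → String
  | [] => ""
  | k :: rest => if items.getD k 0 = 3 then String.ofList [k] else scanKeys items rest

def find_match (elves : List String) : String :=
  let items := elves.foldl (fun d e => update_items e d) PySem.Dict.empty
  scanKeys items items.keys

-- ===== PORT B =====
-- def go(pool): if not pool: return ""; first = pool[0];
--   rest = [x for x in pool if x != first];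
--   if len(pool) - len(rest) == 3: return first;  return go(rest)
def goB (pool : List Char) : String :=
  match pool with
  | [] => ""
  | first :: t =>
      let rest := (first :: t).filter (fun x => !(x == first))
      if (first :: t).length - rest.length = 3 then String.ofList [first]
      else goB rest
termination_by pool.length
decreasing_by
  simp only [List.filter_cons, BEq.rfl, Bool.not_true, List.length_cons]
  exact Nat.lt_succ_of_le (List.length_filter_le _ _)

-- return go(list("".join(elves)))
def find_match_alt (elves : List String) : String :=
  goB (PySem.Str.join "" elves).toList

-- ===== PRECONDITION & SPEC =====
def Spec_find_match (elves : List String) (out : String) : Prop := out = find_match_alt elves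
instance (elves : List String) (out : String) : Decidable (Spec_find_match elves out) := by unfold Spec_find_match; infer_instance

-- ===== CLAIM (what is proved, stated in full; the proofs are below) =====
def Claim_equal_find_match : Prop := ∀ (elves : List String), Dom_find_match elves → Spec_find_match elves (find_match elves)

-- ===== LEMMAS AND PROOFS =====

-- ''.join(elves) is the flattening of the character lists
theorem joined_toList (elves : List String) :
    (PySem.Str.join "" elves).toList = (elves.map String.toList).flatten := by
  rw [PySem.Str.toList_join]
  show List.intercalate [] (elves.map String.toList) = _
  simp [List.intercalate]
  induction (elves.map String.toList) with
  | nil => simp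
  | cons x xs ih => cases xs <;> simp_all [List.intersperse]

theorem getD_of_not_contains (d : PySem.Dict Char Int) (c : Char)
    (h : d.contains c = false) : d.getD c 0 = 0 := by
  have hn : d.get? c = none := (PySem.Dict.get?_eq_none_iff_contains d c).mpr h
  simp [PySem.Dict.getD, hn]

-- A's dict loop is exactly the Counter of the flattened characters
theorem items_eq_counter (elves : List String) :
    elves.foldl (fun d e => update_items e d) PySem.Dict.empty
      = PySem.Dict.counter (elves.map String.toList).flatten := by
  have hfn : (fun (d : PySem.Dict Char Int) (c : Char) =>
        if !(d.contains c) then d.insert c 1 else d.insert c (d.getD c 0 + 1))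
      = (fun d c => d.insert c (d.getD c 0 + 1)) := by
    funext d c
    by_cases h : d.contains c = true
    · simp [h]
    · simp only [Bool.not_eq_true] at h
      simp [h, getD_of_not_contains d c h]
  rw [← PySem.Dict.foldl_insert_getD_add_one_eq_counter, List.foldl_flatten, List.foldl_map]
  simp only [update_items, hfn]

-- the foldl-Set.add loop peels off the accumulator: everything already in s is skipped
theorem foldl_add_acc (n : Nat) (t : List Char) (s : PySem.Set Char) (hle : t.length ≤ n) :
    t.foldl PySem.Set.add s = s ++ PySem.Set.ofList (t.filter (fun x => !(s.contains x))) := by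
  induction n generalizing t s with
  | zero =>
      have : t = [] := List.eq_nil_of_length_eq_zero (Nat.le_zero.mp hle)
      subst this; simp [PySem.Set.ofList]
  | succ n ih =>
      cases t with
      | nil => simp [PySem.Set.ofList]
      | cons x l =>
          simp only [List.length_cons, Nat.add_le_add_iff_right] at hle
          by_cases hx : PySem.Set.contains s x = true
          · have hx' : x ∈ s := by simpa using hx
            have hadd : PySem.Set.add s x = s := by simp [PySem.Set.add, hx']
            simp only [List.foldl_cons, hadd, List.filter_cons, hx, Bool.not_true,
              Bool.false_eq_true, if_false]
            exact ih l s hle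
          · simp only [Bool.not_eq_true] at hx
            have hx' : x ∉ s := by simpa using hx
            have hadd : PySem.Set.add s x = s ++ [x] := by simp [PySem.Set.add, hx']
            simp only [List.foldl_cons, hadd, List.filter_cons, hx, Bool.not_false, if_true]
            rw [ih l (s ++ [x]) hle]
            have hfeq : l.filter (fun y => !(PySem.Set.contains (s ++ [x]) y))
                = (l.filter (fun y => !(PySem.Set.contains s y))).filter
                    (fun y => !(PySem.Set.contains [x] y)) := by
              rw [List.filter_filter]
              apply List.filter_congr
              intro y _
              rw [Bool.eq_iff_iff]
              simp [PySem.Set.contains, and_comm]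
            have hof : PySem.Set.ofList (x :: l.filter (fun y => !(PySem.Set.contains s y)))
                = [x] ++ PySem.Set.ofList ((l.filter (fun y => !(PySem.Set.contains s y))).filter
                    (fun y => !(PySem.Set.contains [x] y))) := by
              show (x :: l.filter (fun y => !(PySem.Set.contains s y))).foldl PySem.Set.add [] = _
              simp only [List.foldl_cons]
              have h0 : PySem.Set.add [] x = [x] := by simp [PySem.Set.add, PySem.Set.contains]
              rw [h0, ih _ [x] (le_trans (List.length_filter_le _ _) hle)]
            rw [hof, hfeq, List.append_assoc]

-- first-occurrence dedup peels its head
theorem dedup_cons (c : Char) (t : List Char) :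
    PySem.List.dedup (c :: t) = c :: PySem.List.dedup (t.filter (fun x => !(x == c))) := by
  rw [PySem.List.dedup_eq_ofList, PySem.List.dedup_eq_ofList]
  show (c :: t).foldl PySem.Set.add [] = _
  simp only [List.foldl_cons]
  have h0 : PySem.Set.add [] c = [c] := by simp [PySem.Set.add, PySem.Set.contains]
  rw [h0, foldl_add_acc t.length t [c] le_rfl]
  have hfeq : t.filter (fun y => !(PySem.Set.contains [c] y)) = t.filter (fun x => !(x == c)) := by
    apply List.filter_congr
    intro y _
    rw [Bool.eq_iff_iff]
    simp [PySem.Set.contains]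
  rw [hfeq]
  rfl

-- key scan only looks the listed keys up
theorem scanKeys_congr (d d' : PySem.Dict Char Int) (l : List Char)
    (h : ∀ k ∈ l, d.getD k 0 = d'.getD k 0) : scanKeys d l = scanKeys d' l := by
  induction l with
  | nil => rfl
  | cons k rest ih =>
      simp only [scanKeys, h k (by simp)]
      rw [ih (fun x hx => h x (by simp [hx]))]

-- the length drop of filtering out the head is its multiplicity
theorem length_sub_filter (c : Char) (t : List Char) :
    (c :: t).length - ((c :: t).filter (fun x => !(x == c))).length = (c :: t).count c := by
  simp only [List.filter_cons, BEq.rfl, Bool.not_true, List.length_cons, List.count_cons,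
    Bool.false_eq_true, if_false, BEq.rfl, if_true]
  rw [← List.countP_eq_length_filter]
  have h2 : t.countP (fun x => !(x == c)) + t.countP (fun x => (x == c)) = t.length := by
    induction t with
    | nil => simp
    | cons a l ih => by_cases h : (a == c) <;> simp [h] <;> omega
  have h3 : t.count c = t.countP (fun x => (x == c)) := rfl
  omega

theorem count_filter_ne (x c : Char) (t : List Char) (hx : x ≠ c) :
    (t.filter (fun y => !(y == c))).count x = t.count x := by
  rw [List.count_filter]; simp [hx]

-- B's elimination recursion computes A's scan of the Counter over first occurrences
theorem goB_eq (s : List Char) :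
    goB s = scanKeys (PySem.Dict.counter s) (PySem.List.dedup s) := by
  induction s using goB.induct with
  | case1 => simp [goB, scanKeys, PySem.List.dedup, PySem.Set.ofList]
  | case2 first t rest h3 =>
      have hn : (first :: t).length - ((first :: t).filter (fun x => !(x == first))).length = 3 := h3
      rw [length_sub_filter] at hn
      have hc : ((first :: t).count first : Int) = 3 := by exact_mod_cast hn
      rw [goB, if_pos h3, dedup_cons]
      simp only [scanKeys, PySem.Dict.getD_counter]
      rw [if_pos hc]
  | case3 first t rest h3 ih =>
      have hcne : ((first :: t).count first : Int) ≠ 3 := by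
        intro h
        apply h3
        show (first :: t).length - ((first :: t).filter (fun x => !(x == first))).length = 3
        rw [length_sub_filter]
        exact_mod_cast h
      have hrest : rest = t.filter (fun x => !(x == first)) := by
        show (first :: t).filter (fun x => !(x == first)) = _
        simp
      rw [hrest] at ih
      have hrest' : (first :: t).filter (fun x => !(x == first)) = t.filter (fun x => !(x == first)) := by
        simp
      rw [goB, if_neg h3, hrest', ih, dedup_cons]
      simp only [scanKeys, PySem.Dict.getD_counter]
      rw [if_neg hcne]
      apply scanKeys_congr
      intro k hk
      have hkf : k ∈ t.filter (fun x => !(x == first)) := (PySem.List.mem_dedup _ _).mp hk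
      rcases List.mem_filter.mp hkf with ⟨hkt, hkne⟩
      have hne : k ≠ first := by simpa using hkne
      rw [PySem.Dict.getD_counter, PySem.Dict.getD_counter,
        count_filter_ne k first t hne, List.count_cons]
      simp [Ne.symm hne]

-- ===== VERDICT (by name: the statement is the Claim_ definition above) =====
theorem find_match_spec : Claim_equal_find_match := by
  intro elves _
  show find_match elves = find_match_alt elves
  simp only [find_match, find_match_alt, items_eq_counter, PySem.Dict.keys_counter,
    joined_toList, goB_eq, PySem.List.dedup_eq_ofList]
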